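-- pv_equiv track=rewrite | github.com/bytedance/ic_flow_platform | bin/user_config.py | gen_node_level
-- ===== SOURCE A (Python) =====
-- from typing import Tuple, Dict, List
--
-- def gen_node_level(graph) -> Dict[str, int]:
--     levels = {}
--
--     def assign_level(node):
--         if node in levels:
--             return levels[node]
--
--         if node not in graph:
--             levels[node] = 0
--             return 0
--
--         max_level = max((assign_level(child) for child in graph[node]), default=-1) + 1
--         levels[node] = max_level
--         return max_level
--
--     for node in set(graph).union(set().union(*graph.values())):
--         if node not in levels:
--             assign_level(node)
--
--     return levels
-- ===== SOURCE B (Python) =====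
-- def gen_node_level(graph):
--     # Iterative explicit-stack post-order DFS instead of recursion.
--     levels = {}
--     nodes = dict.fromkeys(list(graph) + [c for cs in graph.values() for c in cs])
--     for start in nodes:
--         stack = [start]
--         while stack:
--             node = stack[-1]
--             if node in levels:
--                 stack.pop()
--                 continue
--             children = graph.get(node, ())
--             pending = [c for c in children if c not in levels]
--             if pending:
--                 stack.extend(reversed(pending))
--             else:
--                 levels[node] = max((levels[c] for c in children), default=-1) + 1
--                 stack.pop()
--     return levels
-- ===== Notes on version B (the rewrite author's own statement) =====
-- stated objective: alternative
-- what changed: Replaces A's memoized recursive DFS (assign_level calling itself on children) with an explicit-stack iterative post-order DFS: each unprocessed node is pushed on a stack, unvisited children are pushed above it, and a node's level is assigned when all its children have levels, producing the same levels dict.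
import Mathlib
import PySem

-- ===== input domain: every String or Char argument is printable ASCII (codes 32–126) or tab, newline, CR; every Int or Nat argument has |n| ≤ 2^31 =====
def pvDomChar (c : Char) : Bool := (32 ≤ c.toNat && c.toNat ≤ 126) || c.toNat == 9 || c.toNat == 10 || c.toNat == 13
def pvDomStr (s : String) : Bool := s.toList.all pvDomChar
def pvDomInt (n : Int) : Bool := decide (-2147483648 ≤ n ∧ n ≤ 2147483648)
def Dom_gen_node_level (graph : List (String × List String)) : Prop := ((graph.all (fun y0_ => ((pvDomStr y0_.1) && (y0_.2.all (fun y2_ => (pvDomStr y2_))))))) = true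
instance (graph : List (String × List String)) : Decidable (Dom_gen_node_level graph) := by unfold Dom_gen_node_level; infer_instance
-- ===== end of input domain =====

-- B replaces A's memoized recursive DFS by an explicit-stack iterative post-order DFS
-- (objective: alternative decomposition, same asymptotic cost).  Output dicts are
-- association lists; Python iterates a hash set, whose order is not modelled, so the
-- ports fix the insertion order (keys first, then children, first occurrences) —
-- Python outputs are compared to the ports ignoring dict order.

-- ===== PORT A =====
-- dicts are association lists with unique keys (Pre_ demands nodup keys for `graph`,
-- and `levels` only ever appends fresh keys), so first-match List.lookup is exact dict
-- semantics and appending is exact dict insertion.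
-- `assign_level` is fueled (Python recursion raises RecursionError on cycles; Pre_
-- excludes cyclic graphs, where the fuel K+2 is proved sufficient).
mutual
def pvAssign (g : List (String × List String)) : Nat → List (String × Int) → String → Option (List (String × Int) × Int)
  | 0, _, _ => none
  | f+1, l, n =>
    match List.lookup n l with
    | some v => some (l, v)                                   -- if node in levels: return levels[node]
    | none =>
      match List.lookup n g with
      | none => some (l ++ [(n, 0)], 0)                       -- if node not in graph: levels[node] = 0
      | some cs =>
        match pvAssignMax g f l cs (-1) with                  -- max((assign_level(c) for c in graph[node]), default=-1)
        | none => none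
        | some (l1, m) => some (l1 ++ [(n, m + 1)], m + 1)    -- levels[node] = max_level
  termination_by f _ _ => (f, 0)
def pvAssignMax (g : List (String × List String)) : Nat → List (String × Int) → List String → Int → Option (List (String × Int) × Int)
  | _, l, [], m => some (l, m)
  | f, l, c :: cs, m =>
    match pvAssign g f l c with
    | none => none
    | some (l1, v) => pvAssignMax g f l1 cs (max m v)
  termination_by f _ cs _ => (f, cs.length + 1)
end

-- set(graph).union(set().union(*graph.values())) — Python set iteration order is hash
-- order (not modelled; output dicts are compared ignoring order), so the port fixes
-- first-insertion order; union's second argument is consumed only for membership, so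
-- the flattened children lists are passed to it directly.
def pvNodesA (g : List (String × List String)) : List String :=
  PySem.Set.union (PySem.Set.ofList (g.map Prod.fst)) (g.flatMap Prod.snd)

def gen_node_level (graph : List (String × List String)) : List (String × Int) :=
  match (pvNodesA graph).foldl (fun acc node =>
      match acc with
      | none => none
      | some l =>
        match List.lookup node l with
        | some _ => some l                                     -- if node not in levels: (skip)
        | none =>
          match pvAssign graph (graph.length + 2) l node with
          | none => none
          | some (l', _) => some l') (some []) with
  | some l => l
  | none => []                                                 -- unreachable under Pre_ (Python raises RecursionError)

-- ===== PORT B =====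
-- explicit-stack iterative DFS; the while-loop is fueled (it spins forever on cycles,
-- which Pre_ excludes; the fuel below is proved sufficient on acyclic graphs).
def pvRun (g : List (String × List String)) : Nat → List (String × Int) → List String → Option (List (String × Int))
  | _, l, [] => some l                                         -- while stack:
  | 0, _, _ :: _ => none
  | f+1, l, n :: rest =>
    match List.lookup n l with
    | some _ => pvRun g f l rest                               -- if node in levels: stack.pop(); continue
    | none =>
      let cs := (List.lookup n g).getD []                      -- children = graph.get(node, ())
      let pending := cs.filter (fun c => (List.lookup c l).isNone)
      if pending.isEmpty then
        -- levels[node] = max((levels[c] for c in children), default=-1) + 1; stack.pop()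
        -- (pending empty ⇒ every levels[c] exists, so `.getD 0` never supplies the default)
        pvRun g f (l ++ [(n, cs.foldl (fun m c => max m ((List.lookup c l).getD 0)) (-1) + 1)]) rest
      else
        pvRun g f l (pending ++ n :: rest)                       -- stack.extend(reversed(pending))

def gen_node_level_alt (graph : List (String × List String)) : List (String × Int) :=
  match (PySem.List.dedup (graph.map Prod.fst ++ graph.flatMap Prod.snd)).foldl
      (fun acc start =>
        match acc with
        | none => none
        | some l => pvRun graph
            (((graph.flatMap Prod.snd).length + 2) ^ (graph.length + 2)) l [start]) (some []) with
  | some l => l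
  | none => []

-- ===== PRECONDITION & SPEC =====
def pvSuccs (g : List (String × List String)) (n : String) : List String :=
  (List.lookup n g).getD []

-- pvReach g k a b: there is a path from a to b of length ≤ k
def pvReach (g : List (String × List String)) : Nat → String → String → Bool
  | 0, a, b => a == b
  | k+1, a, b => a == b || (pvSuccs g a).any (fun c => pvReach g k c b)

-- Pre_ excludes (1) duplicate keys, where the dict-as-association-list convention is
-- ambiguous (Python collapses them, first-match lookup does not), and (2) cyclic
-- graphs, on which Python A raises RecursionError (and Python B loops forever).
def Pre_gen_node_level (graph : List (String × List String)) : Prop :=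
  (graph.map Prod.fst).Nodup ∧
  ∀ a ∈ graph.map Prod.fst,
    ((pvSuccs graph a).any (fun b => pvReach graph (2 * graph.length + 5) b a)) = false

instance (graph : List (String × List String)) : Decidable (Pre_gen_node_level graph) := by
  unfold Pre_gen_node_level; infer_instance

def pvWitness_gen_node_level : (List (String × List String)) :=
  [("a", ["b", "c"]), ("b", ["c"])]

def Spec_gen_node_level (graph : List (String × List String)) (out : List (String × Int)) : Prop := out = gen_node_level_alt graph
instance (graph : List (String × List String)) (out : List (String × Int)) : Decidable (Spec_gen_node_level graph out) := by unfold Spec_gen_node_level; infer_instance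

-- ===== CLAIM (what is proved, stated in full; the proofs are below) =====
def Claim_equal_gen_node_level : Prop := ∀ (graph : List (String × List String)), Dom_gen_node_level graph → Pre_gen_node_level graph → Spec_gen_node_level graph (gen_node_level graph)

-- ===== LEMMAS AND PROOFS =====

-- abbreviations used only by the proofs
def pvAcy (g : List (String × List String)) : Prop :=
  ∀ a ∈ g.map Prod.fst,
    ((pvSuccs g a).any (fun b => pvReach g (2 * g.length + 5) b a)) = false

-- lookup facts
theorem pv_lookup_append_some {n : String} {l s : List (String × Int)} {v : Int}
    (h : List.lookup n l = some v) : List.lookup n (l ++ s) = some v := by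
  simp [List.lookup_append, h]

theorem pv_lookup_append_none {n : String} {l s : List (String × Int)}
    (h : List.lookup n l = none) : List.lookup n (l ++ s) = List.lookup n s := by
  simp [List.lookup_append, h]

theorem pv_lookup_mem_keys {n : String} {g : List (String × List String)} {cs : List String}
    (h : List.lookup n g = some cs) : n ∈ g.map Prod.fst := by
  induction g with
  | nil => simp at h
  | cons p t ih =>
    rw [List.lookup_cons] at h
    by_cases hp : p.1 = n
    · simp [hp]
    · have hb : (n == p.1) = false := by simp [Ne.symm hp]
      rw [hb] at h
      have := ih h
      simp at this ⊢
      right; exact this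

theorem pv_lookup_len {n : String} {g : List (String × List String)} {cs : List String}
    (h : List.lookup n g = some cs) : cs.length ≤ (g.flatMap Prod.snd).length := by
  induction g with
  | nil => simp at h
  | cons p t ih =>
    rw [List.lookup_cons] at h
    simp only [List.flatMap_cons, List.length_append]
    by_cases hp : n == p.1
    · rw [hp] at h
      simp at h
      subst h
      omega
    · rw [Bool.eq_false_iff.mpr hp] at h
      have := ih h
      omega

-- reachability facts
theorem pv_reach_succ_iff {g : List (String × List String)} {k : Nat} {a b : String} :
    pvReach g (k+1) a b = true ↔ a = b ∨ ∃ c ∈ pvSuccs g a, pvReach g k c b = true := by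
  simp [pvReach]

theorem pv_reach_zero_iff {g : List (String × List String)} {a b : String} :
    pvReach g 0 a b = true ↔ a = b := by
  simp [pvReach]

theorem pv_reach_refl (g : List (String × List String)) (k : Nat) (a : String) :
    pvReach g k a a = true := by
  cases k <;> simp [pvReach]

theorem pv_reach_mono {g : List (String × List String)} {k k' : Nat} {a b : String}
    (hk : k ≤ k') (h : pvReach g k a b = true) : pvReach g k' a b = true := by
  induction k' generalizing k a with
  | zero =>
    have : k = 0 := by omega
    subst this; exact h
  | succ k2 ih =>
    cases k with
    | zero =>
      rw [pv_reach_zero_iff] at h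
      exact pv_reach_succ_iff.mpr (Or.inl h)
    | succ k1 =>
      rw [pv_reach_succ_iff] at h ⊢
      rcases h with h | ⟨c, hc, h⟩
      · exact Or.inl h
      · exact Or.inr ⟨c, hc, ih (by omega) h⟩

theorem pv_reach_step {g : List (String × List String)} {k : Nat} {a b c : String}
    (hc : c ∈ pvSuccs g a) (h : pvReach g k c b = true) : pvReach g (k+1) a b = true := by
  simp [pvReach]
  right; exact ⟨c, hc, h⟩

theorem pv_reach_snoc {g : List (String × List String)} {k : Nat} {y p n : String}
    (h : pvReach g k y p = true) (hn : n ∈ pvSuccs g p) : pvReach g (k+1) y n = true := by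
  induction k generalizing y with
  | zero =>
    rw [pv_reach_zero_iff] at h
    subst h
    exact pv_reach_succ_iff.mpr (Or.inr ⟨n, hn, pv_reach_zero_iff.mpr rfl⟩)
  | succ k1 ih =>
    rw [pv_reach_succ_iff] at h ⊢
    rcases h with h | ⟨c, hc, h⟩
    · subst h
      exact Or.inr ⟨n, hn, pv_reach_refl _ _ _⟩
    · exact Or.inr ⟨c, hc, ih h⟩

theorem pv_succs_mem_keys {g : List (String × List String)} {p x : String}
    (h : x ∈ pvSuccs g p) : p ∈ g.map Prod.fst := by
  unfold pvSuccs at h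
  cases hl : List.lookup p g with
  | none => simp [hl] at h
  | some cs =>
    clear h
    induction g with
    | nil => simp at hl
    | cons pr t ih2 =>
      rw [List.lookup_cons] at hl
      by_cases hp : p == pr.1
      · simp [beq_iff_eq.mp hp]
      · rw [Bool.eq_false_iff.mpr hp] at hl
        simp only [List.map_cons, List.mem_cons]
        exact Or.inr (ih2 hl)

-- ancestor chains (anc = [parent, grandparent, …])
def pvChain (g : List (String × List String)) : String → List String → Prop
  | _, [] => True
  | n, p :: ps => n ∈ pvSuccs g p ∧ pvChain g p ps

theorem pv_chain_mem_keys {g : List (String × List String)} {n : String} {anc : List String}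
    (h : pvChain g n anc) : ∀ p ∈ anc, p ∈ g.map Prod.fst := by
  induction anc generalizing n with
  | nil => simp
  | cons p ps ih =>
    obtain ⟨hmem, hch⟩ := h
    intro q hq
    rcases List.mem_cons.mp hq with rfl | hq
    · exact pv_succs_mem_keys hmem
    · exact ih hch q hq

theorem pv_chain_reach {g : List (String × List String)} {n : String} {anc : List String}
    (h : pvChain g n anc) : ∀ x ∈ anc, ∃ y ∈ pvSuccs g x, pvReach g anc.length y n = true := by
  induction anc generalizing n with
  | nil => simp
  | cons p ps ih =>
    obtain ⟨hmem, hch⟩ := h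
    intro x hx
    rcases List.mem_cons.mp hx with rfl | hx
    · exact ⟨n, hmem, pv_reach_refl _ _ _⟩
    · obtain ⟨y, hy, hr⟩ := ih hch x hx
      exact ⟨y, hy, pv_reach_snoc hr hmem⟩

theorem pv_lookup_none_of_not_mem {n : String} {s : List (String × Int)}
    (h : n ∉ s.map Prod.fst) : List.lookup n s = none := by
  induction s with
  | nil => simp
  | cons p t ih =>
    simp only [List.map_cons, List.mem_cons, not_or] at h
    rw [List.lookup_cons]
    have hb : (n == p.1) = false := beq_eq_false_iff_ne.mpr h.1
    rw [hb]
    exact ih h.2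

theorem pv_nodup_subset_length {anc keys : List String} (h : anc.Nodup) (hs : anc ⊆ keys) :
    anc.length ≤ keys.length := by
  have h1 := List.toFinset_card_of_nodup h
  have h2 : anc.toFinset ⊆ keys.toFinset := by intro x hx; simp at hx ⊢; exact hs hx
  have h3 := Finset.card_le_card h2
  have h4 := keys.toFinset_card_le
  omega

-- not-in-anc from acyclicity
theorem pv_acy_not_mem_anc {g : List (String × List String)} {n : String} {anc : List String}
    (hacy : pvAcy g) (hch : pvChain g n anc) (hk : n ∈ g.map Prod.fst)
    (hlen : anc.length ≤ 2 * g.length + 5) : n ∉ anc := by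
  intro hmem
  obtain ⟨y, hy, hr⟩ := pv_chain_reach hch n hmem
  have hr' : pvReach g (2 * g.length + 5) y n = true := pv_reach_mono hlen hr
  have := hacy n hk
  rw [List.any_eq_false] at this
  exact absurd hr' (by simpa using this y hy)

-- ===== termination of pvAssign on acyclic graphs =====
theorem pv_assign_total (g : List (String × List String)) (hacy : pvAcy g) :
    ∀ f : Nat, (∀ l n anc, pvChain g n anc → anc.Nodup →
        g.length + 2 ≤ f + anc.length → (pvAssign g f l n).isSome) := by
  intro f
  induction f using Nat.strong_induction_on with
  | _ f ih =>
    intro l n anc hch hnd hlen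
    have hsub : anc ⊆ g.map Prod.fst := fun {p} hp => pv_chain_mem_keys hch p hp
    have hanc : anc.length ≤ g.length := by
      have := pv_nodup_subset_length hnd hsub
      simpa using this
    obtain ⟨f1, rfl⟩ : ∃ f1, f = f1 + 1 := ⟨f - 1, by omega⟩
    rw [pvAssign]
    cases h1 : List.lookup n l with
    | some v => simp
    | none =>
      cases h2 : List.lookup n g with
      | none => simp
      | some cs =>
        have hkey : n ∈ g.map Prod.fst := pv_lookup_mem_keys h2
        have hnotmem : n ∉ anc := pv_acy_not_mem_anc hacy hch hkey (by omega)
        have hmax : ∀ cs' : List String, (∀ c ∈ cs', c ∈ pvSuccs g n) →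
            ∀ l' m, (pvAssignMax g f1 l' cs' m).isSome := by
          intro cs'
          induction cs' with
          | nil => intro _ l' m; simp [pvAssignMax]
          | cons c cst ih2 =>
            intro hcs l' m
            have hc : (pvAssign g f1 l' c).isSome := by
              apply ih f1 (by omega) l' c (n :: anc) ⟨hcs c (by simp), hch⟩
              · exact List.nodup_cons.mpr ⟨hnotmem, hnd⟩
              · simp; omega
            obtain ⟨⟨l1, v⟩, hv⟩ := Option.isSome_iff_exists.mp hc
            rw [pvAssignMax, hv]
            exact ih2 (fun c hc => hcs c (by simp [hc])) l1 (max m v)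
        have hm' := hmax cs (by intro c hc; simp [pvSuccs, h2, hc]) l (-1)
        obtain ⟨⟨l1, m⟩, hm⟩ := Option.isSome_iff_exists.mp hm'
        simp [hm]

-- ===== structural facts about pvAssign (P1/P2) =====
theorem pv_assign_struct (g : List (String × List String)) (hacy : pvAcy g) :
    ∀ f : Nat,
      (∀ l n l' v, f ≤ g.length + 2 → pvAssign g f l n = some (l', v) →
        (∃ s, l' = l ++ s ∧ ∀ x ∈ s.map Prod.fst, pvReach g f n x = true) ∧
        List.lookup n l' = some v) ∧
      (∀ l cs m l1 m1, f ≤ g.length + 2 → pvAssignMax g f l cs m = some (l1, m1) →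
        (∃ s, l1 = l ++ s ∧ ∀ x ∈ s.map Prod.fst, ∃ c ∈ cs, pvReach g f c x = true) ∧
        (∀ c ∈ cs, (List.lookup c l1).isSome) ∧
        m1 = cs.foldl (fun m c => max m ((List.lookup c l1).getD 0)) m) := by
  intro f
  induction f using Nat.strong_induction_on with
  | _ f ih =>
    have hP1 : ∀ l n l' v, f ≤ g.length + 2 → pvAssign g f l n = some (l', v) →
        (∃ s, l' = l ++ s ∧ ∀ x ∈ s.map Prod.fst, pvReach g f n x = true) ∧
        List.lookup n l' = some v := by
      intro l n l' v hf h
      cases f with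
      | zero => simp [pvAssign] at h
      | succ f1 =>
        rw [pvAssign] at h
        cases h1 : List.lookup n l with
        | some v0 =>
          simp only [h1, Option.some.injEq, Prod.mk.injEq] at h
          obtain ⟨rfl, rfl⟩ := h
          exact ⟨⟨[], by simp, by simp⟩, h1⟩
        | none =>
          simp only [h1] at h
          cases h2 : List.lookup n g with
          | none =>
            simp only [h2, Option.some.injEq, Prod.mk.injEq] at h
            obtain ⟨rfl, rfl⟩ := h
            refine ⟨⟨[(n, 0)], rfl, by simp [pv_reach_refl]⟩, ?_⟩
            rw [pv_lookup_append_none h1]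
            simp
          | some cs =>
            simp only [h2] at h
            cases h3 : pvAssignMax g f1 l cs (-1) with
            | none => simp [h3] at h
            | some r =>
              obtain ⟨l1, m⟩ := r
              simp only [h3, Option.some.injEq, Prod.mk.injEq] at h
              obtain ⟨rfl, rfl⟩ := h
              obtain ⟨⟨s1, rfl, hreach1⟩, _, _⟩ :=
                (ih f1 (by omega)).2 l cs (-1) l1 m (by omega) h3
              have hsucc : ∀ c ∈ cs, c ∈ pvSuccs g n := by
                intro c hc; simp [pvSuccs, h2, hc]
              have hnmem : n ∉ s1.map Prod.fst := by
                intro hx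
                obtain ⟨c, hc, hr⟩ := hreach1 n hx
                have hr' : pvReach g (2 * g.length + 5) c n = true :=
                  pv_reach_mono (by omega) hr
                have := hacy n (pv_lookup_mem_keys h2)
                rw [List.any_eq_false] at this
                exact absurd hr' (by simpa using this c (hsucc c hc))
              refine ⟨⟨s1 ++ [(n, m + 1)], by simp, ?_⟩, ?_⟩
              · intro x hx
                simp only [List.map_append, List.mem_append] at hx
                rcases hx with hx | hx
                · obtain ⟨c, hc, hr⟩ := hreach1 x hx
                  exact pv_reach_step (hsucc c hc) hr
                · simp at hx
                  subst hx
                  exact pv_reach_refl _ _ _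
              · have hnone : List.lookup n (l ++ s1) = none := by
                  rw [pv_lookup_append_none h1]
                  exact pv_lookup_none_of_not_mem hnmem
                rw [pv_lookup_append_none hnone, List.lookup_cons]
                simp
    have hP2 : ∀ (cs : List String) (l : List (String × Int)) (m : Int) l1 m1,
        f ≤ g.length + 2 → pvAssignMax g f l cs m = some (l1, m1) →
        (∃ s, l1 = l ++ s ∧ ∀ x ∈ s.map Prod.fst, ∃ c ∈ cs, pvReach g f c x = true) ∧
        (∀ c ∈ cs, (List.lookup c l1).isSome) ∧
        m1 = cs.foldl (fun m c => max m ((List.lookup c l1).getD 0)) m := by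
      intro cs
      induction cs with
      | nil =>
        intro l m l1 m1 hf h
        rw [pvAssignMax] at h
        simp only [Option.some.injEq, Prod.mk.injEq] at h
        obtain ⟨rfl, rfl⟩ := h
        exact ⟨⟨[], by simp, by simp⟩, by simp, by simp⟩
      | cons c cst ih2 =>
        intro l m l1 m1 hf h
        rw [pvAssignMax] at h
        cases h4 : pvAssign g f l c with
        | none => simp [h4] at h
        | some r =>
          obtain ⟨la, v⟩ := r
          simp only [h4] at h
          obtain ⟨⟨sa, rfl, hra⟩, hlc⟩ := hP1 l c la v hf h4
          obtain ⟨⟨sb, rfl, hrb⟩, hmemb, hvalb⟩ := ih2 (l ++ sa) (max m v) l1 m1 hf h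
          have hlc1 : List.lookup c ((l ++ sa) ++ sb) = some v := pv_lookup_append_some hlc
          refine ⟨⟨sa ++ sb, by simp, ?_⟩, ?_, ?_⟩
          · intro x hx
            simp only [List.map_append, List.mem_append] at hx
            rcases hx with hx | hx
            · exact ⟨c, by simp, hra x hx⟩
            · obtain ⟨c', hc', hr⟩ := hrb x hx
              exact ⟨c', by simp [hc'], hr⟩
          · intro c' hc'
            rcases List.mem_cons.mp hc' with rfl | hc'
            · rw [hlc1]; rfl
            · exact hmemb c' hc'
          · simp only [List.foldl_cons, hlc1, Option.getD_some]
            exact hvalb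
    exact ⟨hP1, fun l cs m l1 m1 => hP2 cs l m l1 m1⟩

-- ===== simulation: pvRun computes what pvAssign computes =====
def pvRunsB (g : List (String × List String)) (b : Nat) (l : List (String × Int))
    (st : List String) (R : List (String × Int)) : Prop :=
  ∀ F, b ≤ F → pvRun g F l st = some R

theorem pv_runsB_mono {g : List (String × List String)} {b b' : Nat} {l : List (String × Int)}
    {st : List String} {R : List (String × Int)} (hb : b ≤ b') (h : pvRunsB g b l st R) :
    pvRunsB g b' l st R := fun F hF => h F (le_trans hb hF)

theorem pv_assignMax_all_memo {g : List (String × List String)} {f : Nat}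
    {l l1 : List (String × Int)} {cs : List String} {m m1 : Int}
    (hall : ∀ c ∈ cs, (List.lookup c l).isSome = true)
    (h : pvAssignMax g f l cs m = some (l1, m1)) : l1 = l := by
  induction cs generalizing m with
  | nil =>
    rw [pvAssignMax] at h
    simp only [Option.some.injEq, Prod.mk.injEq] at h
    exact h.1.symm
  | cons c cst ih =>
    rw [pvAssignMax] at h
    cases hA : pvAssign g f l c with
    | none => simp [hA] at h
    | some r =>
      obtain ⟨la, v⟩ := r
      simp only [hA] at h
      have hla : la = l := by
        cases f with
        | zero => simp [pvAssign] at hA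
        | succ f2 =>
          rw [pvAssign] at hA
          obtain ⟨vc, hvc⟩ := Option.isSome_iff_exists.mp (hall c (by simp))
          simp only [hvc, Option.some.injEq, Prod.mk.injEq] at hA
          exact hA.1.symm
      subst hla
      exact ih (fun c' hc' => hall c' (by simp [hc'])) h

theorem pv_sim (g : List (String × List String)) (hacy : pvAcy g) :
    ∀ f : Nat,
      (∀ l n l' v b tail R, f ≤ g.length + 2 → pvAssign g f l n = some (l', v) →
        pvRunsB g b l' tail R →
        pvRunsB g (b + ((g.flatMap Prod.snd).length + 2) ^ f) l (n :: tail) R) ∧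
      (∀ (cs : List String) (l : List (String × Int)) (m : Int) l1 m1 (l0 : List (String × Int)) (b : Nat) (tail : List String) R, f ≤ g.length + 2 → pvAssignMax g f l cs m = some (l1, m1) →
        (∀ x : String, (List.lookup x l0).isSome = true → (List.lookup x l).isSome = true) →
        pvRunsB g b l1 tail R →
        pvRunsB g (b + cs.length * ((g.flatMap Prod.snd).length + 2) ^ f) l
          (cs.filter (fun c => (List.lookup c l0).isNone) ++ tail) R) := by
  intro f
  induction f using Nat.strong_induction_on with
  | _ f ih =>
    have hCpos : 0 < (g.flatMap Prod.snd).length + 2 := by omega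
    have hP3 : ∀ l n l' v b tail R, f ≤ g.length + 2 → pvAssign g f l n = some (l', v) →
        pvRunsB g b l' tail R →
        pvRunsB g (b + ((g.flatMap Prod.snd).length + 2) ^ f) l (n :: tail) R := by
      intro l n l' v b tail R hf h hrun
      cases f with
      | zero => simp [pvAssign] at h
      | succ f1 =>
        have hpow1 : 1 ≤ ((g.flatMap Prod.snd).length + 2) ^ (f1 + 1) :=
          Nat.one_le_pow _ _ hCpos
        rw [pvAssign] at h
        cases h1 : List.lookup n l with
        | some v0 =>
          simp only [h1, Option.some.injEq, Prod.mk.injEq] at h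
          obtain ⟨rfl, rfl⟩ := h
          intro F hF
          obtain ⟨F1, rfl⟩ : ∃ F1, F = F1 + 1 := ⟨F - 1, by omega⟩
          rw [pvRun]
          simp only [h1]
          exact hrun F1 (by omega)
        | none =>
          simp only [h1] at h
          cases h2 : List.lookup n g with
          | none =>
            simp only [h2, Option.some.injEq, Prod.mk.injEq] at h
            obtain ⟨rfl, rfl⟩ := h
            intro F hF
            obtain ⟨F1, rfl⟩ : ∃ F1, F = F1 + 1 := ⟨F - 1, by omega⟩
            rw [pvRun]
            simp only [h1, h2, Option.getD_none, List.filter_nil, List.isEmpty_nil,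
              if_true, List.foldl_nil]
            have := hrun F1 (by omega)
            simpa using this
          | some cs =>
            simp only [h2] at h
            cases h3 : pvAssignMax g f1 l cs (-1) with
            | none => simp [h3] at h
            | some r =>
              obtain ⟨l1, m⟩ := r
              simp only [h3, Option.some.injEq, Prod.mk.injEq] at h
              obtain ⟨rfl, rfl⟩ := h
              obtain ⟨⟨s1, rfl, hreach1⟩, hmem1, hval1⟩ :=
                (pv_assign_struct g hacy f1).2 l cs (-1) _ m (by omega) h3
              have hsucc : ∀ c ∈ cs, c ∈ pvSuccs g n := by
                intro c hc; simp [pvSuccs, h2, hc]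
              have hnmem : n ∉ s1.map Prod.fst := by
                intro hx
                obtain ⟨c, hc, hr⟩ := hreach1 n hx
                have hr' : pvReach g (2 * g.length + 5) c n = true :=
                  pv_reach_mono (by omega) hr
                have := hacy n (pv_lookup_mem_keys h2)
                rw [List.any_eq_false] at this
                exact absurd hr' (by simpa using this c (hsucc c hc))
              have hn1 : List.lookup n (l ++ s1) = none := by
                rw [pv_lookup_append_none h1]
                exact pv_lookup_none_of_not_mem hnmem
              have hcs_len : cs.length ≤ (g.flatMap Prod.snd).length := pv_lookup_len h2
              have hpowf : 1 ≤ ((g.flatMap Prod.snd).length + 2) ^ f1 :=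
                Nat.one_le_pow _ _ hCpos
              have hpow_succ : ((g.flatMap Prod.snd).length + 2) ^ (f1 + 1) =
                  ((g.flatMap Prod.snd).length + 2) ^ f1 * ((g.flatMap Prod.snd).length + 2) :=
                pow_succ _ _
              -- second visit of n (all children levelled): one step assigns n
              have hsecond : pvRunsB g (b + 1) (l ++ s1) (n :: tail) R := by
                intro F hF
                obtain ⟨F1, rfl⟩ : ∃ F1, F = F1 + 1 := ⟨F - 1, by omega⟩
                rw [pvRun]
                simp only [hn1, h2, Option.getD_some]
                have hpend : cs.filter (fun c => (List.lookup c (l ++ s1)).isNone) = [] := by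
                  rw [List.filter_eq_nil_iff]
                  intro c hc
                  simp [Option.isSome_iff_ne_none.mp (hmem1 c hc)]
                rw [hpend]
                simp only [List.isEmpty_nil, if_true]
                rw [← hval1]
                exact hrun F1 (by omega)
              by_cases hpe : cs.filter (fun c => (List.lookup c l).isNone) = []
              · -- all children already levelled before the first visit: s1 = []
                have hall : ∀ c ∈ cs, (List.lookup c l).isSome = true := by
                  intro c hc
                  have := List.filter_eq_nil_iff.mp hpe c hc
                  simpa [Option.isNone_eq_false_iff, Option.isSome_iff_ne_none] using this
                have hs1 : l ++ s1 = l := pv_assignMax_all_memo hall h3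
                have hs1' : s1 = [] := by
                  have : l ++ s1 = l ++ [] := by simpa using hs1
                  exact List.append_cancel_left this
                subst hs1'
                intro F hF
                obtain ⟨F1, rfl⟩ : ∃ F1, F = F1 + 1 := ⟨F - 1, by omega⟩
                rw [pvRun]
                simp only [h1, h2, Option.getD_some]
                rw [hpe]
                simp only [List.isEmpty_nil, if_true]
                rw [← (by simpa using hval1 : m = cs.foldl (fun m c => max m ((List.lookup c l).getD 0)) (-1))]
                have := hrun F1 (by omega)
                simpa using this
              · -- some children pending: push them, process, revisit n
                have hP4 := (ih f1 (by omega)).2 cs l (-1) _ m l (b + 1) (n :: tail) R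
                  (by omega) h3 (fun x hx => hx) hsecond
                intro F hF
                obtain ⟨F1, rfl⟩ : ∃ F1, F = F1 + 1 := ⟨F - 1, by omega⟩
                rw [pvRun]
                simp only [h1, h2, Option.getD_some]
                rw [if_neg (by simpa [List.isEmpty_iff] using hpe)]
                apply hP4
                have harith : cs.length * ((g.flatMap Prod.snd).length + 2) ^ f1 + 2 ≤
                    ((g.flatMap Prod.snd).length + 2) ^ (f1 + 1) := by
                  have h2' : cs.length * ((g.flatMap Prod.snd).length + 2) ^ f1 + 2 ≤
                      (cs.length + 2) * ((g.flatMap Prod.snd).length + 2) ^ f1 := by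
                    have : cs.length * ((g.flatMap Prod.snd).length + 2) ^ f1 + 2 * 1 ≤
                        cs.length * ((g.flatMap Prod.snd).length + 2) ^ f1 +
                        2 * ((g.flatMap Prod.snd).length + 2) ^ f1 := by
                      have := Nat.mul_le_mul_left 2 hpowf
                      omega
                    calc cs.length * ((g.flatMap Prod.snd).length + 2) ^ f1 + 2
                        ≤ cs.length * ((g.flatMap Prod.snd).length + 2) ^ f1 +
                          2 * ((g.flatMap Prod.snd).length + 2) ^ f1 := by omega
                      _ = (cs.length + 2) * ((g.flatMap Prod.snd).length + 2) ^ f1 := by ring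
                  have h3' : (cs.length + 2) * ((g.flatMap Prod.snd).length + 2) ^ f1 ≤
                      ((g.flatMap Prod.snd).length + 2) * ((g.flatMap Prod.snd).length + 2) ^ f1 :=
                    Nat.mul_le_mul_right _ (by omega)
                  have h4' : ((g.flatMap Prod.snd).length + 2) *
                      ((g.flatMap Prod.snd).length + 2) ^ f1 =
                      ((g.flatMap Prod.snd).length + 2) ^ (f1 + 1) := by
                    rw [hpow_succ]; ring
                  omega
                omega
    have hP4 : ∀ (cs : List String) (l : List (String × Int)) (m : Int) l1 m1 (l0 : List (String × Int)) (b : Nat) (tail : List String) R, f ≤ g.length + 2 → pvAssignMax g f l cs m = some (l1, m1) →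
        (∀ x : String, (List.lookup x l0).isSome = true → (List.lookup x l).isSome = true) →
        pvRunsB g b l1 tail R →
        pvRunsB g (b + cs.length * ((g.flatMap Prod.snd).length + 2) ^ f) l
          (cs.filter (fun c => (List.lookup c l0).isNone) ++ tail) R := by
      intro cs
      induction cs with
      | nil =>
        intro l m l1 m1 l0 b tail R hf h hsub hrun
        rw [pvAssignMax] at h
        simp only [Option.some.injEq, Prod.mk.injEq] at h
        obtain ⟨rfl, rfl⟩ := h
        simpa using hrun
      | cons c cst ih2 =>
        intro l m l1 m1 l0 b tail R hf h hsub hrun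
        rw [pvAssignMax] at h
        cases hA : pvAssign g f l c with
        | none => simp [hA] at h
        | some r =>
          obtain ⟨la, v⟩ := r
          simp only [hA] at h
          obtain ⟨⟨sa, rfl, _⟩, hlc⟩ := (pv_assign_struct g hacy f).1 l c _ v hf hA
          by_cases hc0 : (List.lookup c l0).isNone = true
          · have hfil : (c :: cst).filter (fun c => (List.lookup c l0).isNone) =
                c :: cst.filter (fun c => (List.lookup c l0).isNone) := by
              simp [hc0]
            rw [hfil]
            have hsub' : ∀ x, (List.lookup x l0).isSome = true →
                (List.lookup x (l ++ sa)).isSome = true := by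
              intro x hx
              obtain ⟨vx, hvx⟩ := Option.isSome_iff_exists.mp (hsub x hx)
              rw [pv_lookup_append_some hvx]; rfl
            have hrest := ih2 (l ++ sa) (max m v) l1 m1 l0 b tail R hf h hsub' hrun
            have hstep := hP3 l c _ v (b + cst.length * ((g.flatMap Prod.snd).length + 2) ^ f)
              (cst.filter (fun c => (List.lookup c l0).isNone) ++ tail) R hf hA hrest
            refine pv_runsB_mono (le_of_eq ?_) hstep
            rw [List.length_cons, add_one_mul]
            ring
          · have hcl : (List.lookup c l).isSome = true := by
              apply hsub
              simpa [Option.isNone_eq_false_iff, Option.isSome_iff_ne_none] using hc0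
            have hla : l ++ sa = l := by
              cases f with
              | zero => simp [pvAssign] at hA
              | succ f2 =>
                rw [pvAssign] at hA
                obtain ⟨vc, hvc⟩ := Option.isSome_iff_exists.mp hcl
                simp only [hvc, Option.some.injEq, Prod.mk.injEq] at hA
                exact hA.1.symm
            rw [hla] at h
            have hfil : (c :: cst).filter (fun c => (List.lookup c l0).isNone) =
                cst.filter (fun c => (List.lookup c l0).isNone) := by
              simp [hc0]
            rw [hfil]
            have hrest := ih2 l (max m v) l1 m1 l0 b tail R hf h hsub hrun
            refine pv_runsB_mono ?_ hrest
            have hpowf : 1 ≤ ((g.flatMap Prod.snd).length + 2) ^ f :=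
              Nat.one_le_pow _ _ hCpos
            have := Nat.mul_le_mul_right (((g.flatMap Prod.snd).length + 2) ^ f)
              (Nat.le_succ cst.length)
            simpa [Nat.succ_mul] using Nat.add_le_add_left this b
    exact ⟨hP3, hP4⟩

-- node-list equality between the two ports
theorem pv_nodes_eq (g : List (String × List String)) :
    pvNodesA g = PySem.List.dedup (g.map Prod.fst ++ g.flatMap Prod.snd) := by
  unfold pvNodesA
  have hu : ∀ (a : PySem.Set String) (b : List String),
      PySem.Set.union a b = PySem.Set.update a b := fun _ _ => rfl
  rw [hu, PySem.List.dedup_eq_ofList]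
  simp [pysem]

-- top-level fold: the two ports' per-node step functions
def pvStepA (g : List (String × List String)) (acc : Option (List (String × Int)))
    (node : String) : Option (List (String × Int)) :=
  match acc with
  | none => none
  | some l =>
    match List.lookup node l with
    | some _ => some l
    | none =>
      match pvAssign g (g.length + 2) l node with
      | none => none
      | some (l', _) => some l'

def pvStepB (g : List (String × List String)) (acc : Option (List (String × Int)))
    (start : String) : Option (List (String × Int)) :=
  match acc with
  | none => none
  | some l => pvRun g (((g.flatMap Prod.snd).length + 2) ^ (g.length + 2)) l [start]

theorem pvRun_nil (g : List (String × List String)) (f : Nat) (l : List (String × Int)) :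
    pvRun g f l [] = some l := by
  cases f <;> rfl

theorem pv_fold_eq (g : List (String × List String)) (hacy : pvAcy g) :
    ∀ (ns : List String) (l : List (String × Int)),
      ns.foldl (pvStepA g) (some l) = ns.foldl (pvStepB g) (some l) ∧
      ∃ lf, ns.foldl (pvStepA g) (some l) = some lf := by
  intro ns
  induction ns with
  | nil => intro l; exact ⟨rfl, l, rfl⟩
  | cons n ns ih =>
    intro l
    simp only [List.foldl_cons]
    have hFB : 1 ≤ ((g.flatMap Prod.snd).length + 2) ^ (g.length + 2) :=
      Nat.one_le_pow _ _ (by omega)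
    cases h1 : List.lookup n l with
    | some v =>
      have hA : pvStepA g (some l) n = some l := by
        unfold pvStepA; simp [h1]
      have hB : pvStepB g (some l) n = some l := by
        show pvRun g (((g.flatMap Prod.snd).length + 2) ^ (g.length + 2)) l [n] = some l
        obtain ⟨F1, hF1⟩ : ∃ F1, ((g.flatMap Prod.snd).length + 2) ^ (g.length + 2) = F1 + 1 :=
          ⟨((g.flatMap Prod.snd).length + 2) ^ (g.length + 2) - 1, by omega⟩
        rw [hF1, pvRun]
        simp only [h1]
        exact pvRun_nil g F1 l
      rw [hA, hB]
      exact ih l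
    | none =>
      have htot : (pvAssign g (g.length + 2) l n).isSome :=
        pv_assign_total g hacy (g.length + 2) l n [] trivial List.nodup_nil (by simp)
      obtain ⟨⟨l', v⟩, hass⟩ := Option.isSome_iff_exists.mp htot
      have hA : pvStepA g (some l) n = some l' := by
        unfold pvStepA; simp [h1, hass]
      have hrun0 : pvRunsB g 0 l' [] l' := fun F _ => pvRun_nil g F l'
      have hsim := (pv_sim g hacy (g.length + 2)).1 l n l' v 0 [] l' (le_refl _) hass hrun0
      have hB : pvStepB g (some l) n = some l' := by
        show pvRun g (((g.flatMap Prod.snd).length + 2) ^ (g.length + 2)) l [n] = some l'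
        exact hsim _ (by omega)
      rw [hA, hB]
      exact ih l'

-- ===== VERDICT (by name: the statement is the Claim_ definition above) =====
theorem gen_node_level_spec : Claim_equal_gen_node_level := by
  intro graph _ hpre
  obtain ⟨hnd, hacy⟩ := hpre
  have h := pv_fold_eq graph hacy (pvNodesA graph) []
  unfold Spec_gen_node_level gen_node_level gen_node_level_alt
  rw [← pv_nodes_eq graph]
  show (match (pvNodesA graph).foldl (pvStepA graph) (some []) with
        | some l => l | none => ([] : List (String × Int))) =
      (match (pvNodesA graph).foldl (pvStepB graph) (some []) with
        | some l => l | none => ([] : List (String × Int)))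
  rw [h.1]
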